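-- pv_equiv track=rewrite | github.com/KofClubs/Docker-and-Kubernetes-Mirror-Synchronizer | local_repo_viewer/pkgname_ver_gen.py | format_ver
-- ===== SOURCE A (Python) =====
-- def format_ver(ver):
--     digits = ['0', '1', '2', '3', '4', '5', '6', '7', '8', '9']
--     formattedVer = ""
--     countOfDot = 0  # 我们只返回major.minor.patch格式的版本号
--     for i in range(len(ver)):
--         if ver[i] not in digits and countOfDot >= 2:
--             return formattedVer
--         if ver[i] == ".":
--             countOfDot += 1
--         formattedVer += ver[i]
--     return formattedVer
-- ===== SOURCE B (Python) =====
-- def format_ver(ver):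
--     dots = [i for i, c in enumerate(ver) if c == '.']
--     if len(dots) < 2:
--         return ver
--     k = dots[1] + 1
--     while k < len(ver) and ver[k].isdigit():
--         k += 1
--     return ver[:k]
-- ===== Notes on version B (the rewrite author's own statement) =====
-- stated objective: simpler
-- what changed: Replaces the char-by-char accumulating state machine with its dot-counter by: collect the dot positions, cut after the second dot plus its following digit run, and return one slice of the input.
import Mathlib
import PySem

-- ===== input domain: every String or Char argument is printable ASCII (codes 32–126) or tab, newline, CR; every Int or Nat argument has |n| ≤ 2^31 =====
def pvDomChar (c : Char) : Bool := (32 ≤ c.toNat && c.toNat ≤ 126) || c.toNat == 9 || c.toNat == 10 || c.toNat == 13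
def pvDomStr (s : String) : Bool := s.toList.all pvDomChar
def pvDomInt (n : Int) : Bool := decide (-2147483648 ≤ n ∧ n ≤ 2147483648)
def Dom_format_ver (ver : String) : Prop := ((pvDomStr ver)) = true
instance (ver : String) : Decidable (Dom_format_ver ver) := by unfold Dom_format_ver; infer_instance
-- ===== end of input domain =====

-- B replaces A's accumulating dot-counter state machine by "collect the dot positions,
-- cut after the second dot plus its digit run, return one slice" (objective: simpler).


-- ===== PORT A =====
-- A's `digits` literal
def pvDigits : List Char := ['0', '1', '2', '3', '4', '5', '6', '7', '8', '9']

-- A's for-loop over ver: state = (formattedVer, countOfDot); early return when a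
-- non-digit is seen with countOfDot >= 2.  `formattedVer += ver[i]`  ↦  `acc ++ [c]`.
def pvLoopA : List Char → List Char → Int → List Char
  | [], acc, _ => acc
  | c :: rest, acc, cnt =>
    if c ∉ pvDigits ∧ 2 ≤ cnt then acc
    else pvLoopA rest (acc ++ [c]) (if c = '.' then cnt + 1 else cnt)

def format_ver (ver : String) : String :=
  String.ofList (pvLoopA ver.toList [] 0)

-- ===== PORT B =====
-- Source B's while loop: `while k < len(ver) and ver[k].isdigit(): k += 1`
-- (the `0 ≤ k` conjunct only makes the in-range indexing total; k starts at dots[1]+1 ≥ 1)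
def pvScan (cs : List Char) (k : Int) : Int :=
  if h : 0 ≤ k ∧ k < (cs.length : Int) then
    if PySem.Chars.isdigit (cs[k.toNat]'(by omega)) then pvScan cs (k + 1) else k
  else k
termination_by (cs.length - k.toNat : Nat)
decreasing_by omega

-- Source B: dots = [i for i, c in enumerate(ver) if c == '.']; if len(dots) < 2: return ver;
-- else k = dots[1]+1 scanned over digits, return ver[:k]  (the `len(dots) < 2` test plus
-- the `dots[1]` lookup is written as the obvious match on the list)
def format_ver_alt (ver : String) : String :=
  match ((PySem.List.enumerate ver.toList).filter (fun p => p.2 == '.')).map (·.1) with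
  | _ :: j :: _ =>
    String.ofList (PySem.List.slice ver.toList none (some (pvScan ver.toList (j + 1))))
  | _ => ver

-- ===== PRECONDITION & SPEC =====
def Spec_format_ver (ver : String) (out : String) : Prop := out = format_ver_alt ver
instance (ver : String) (out : String) : Decidable (Spec_format_ver ver out) := by unfold Spec_format_ver; infer_instance

-- ===== CLAIM (what is proved, stated in full; the proofs are below) =====
def Claim_equal_format_ver : Prop := ∀ (ver : String), Dom_format_ver ver → Spec_format_ver ver (format_ver ver)

-- ===== LEMMAS AND PROOFS =====

-- A's digit test (membership in the literal list) is the ASCII digit test.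
theorem pv_dig_eq (c : Char) : (decide (c ∈ pvDigits)) = PySem.Chars.isdigit c := by
  have h : (c ∈ pvDigits) ↔ ('0' ≤ c ∧ c ≤ '9') := by
    constructor
    · intro h; fin_cases h <;> exact ⟨by decide, by decide⟩
    · rintro ⟨h1, h2⟩
      have g1 : 48 ≤ c.toNat := h1
      have g2 : c.toNat ≤ 57 := h2
      have hc : c = Char.ofNat c.toNat := by simp
      set n := c.toNat with hn
      interval_cases n <;> (rw [hc]; decide)
  rw [decide_eq_decide.mpr h]
  · simp [PySem.Chars.isdigit]
  · infer_instance

-- A's loop once countOfDot ≥ 2: append the leading digit run and stop.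
theorem pvLoopA_ge2 (cs acc : List Char) (cnt : Int) (h : 2 ≤ cnt) :
    pvLoopA cs acc cnt = acc ++ cs.takeWhile PySem.Chars.isdigit := by
  induction cs generalizing acc with
  | nil => simp [pvLoopA]
  | cons c rest ih =>
    rw [pvLoopA]
    by_cases hd : PySem.Chars.isdigit c
    · have hc : c ∈ pvDigits := by
        have := pv_dig_eq c; rw [hd] at this; exact of_decide_eq_true this
      have hne : c ≠ '.' := by rintro rfl; revert hc; decide
      rw [if_neg (by intro hcon; exact hcon.1 hc), if_neg hne, ih _]
      simp [hd]
    · have hc : c ∉ pvDigits := by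
        have := pv_dig_eq c
        intro hm; rw [decide_eq_true hm] at this; exact hd (Eq.symm this ▸ rfl)
      rw [if_pos ⟨hc, h⟩]
      simp [hd]

-- A's loop with countOfDot ≤ 1 over a dot-free string: copies it.
theorem pvLoopA_noDot (pre : List Char) (acc : List Char) (cnt : Int) (hc : cnt ≤ 1) (hp : '.' ∉ pre) :
    pvLoopA pre acc cnt = acc ++ pre := by
  induction pre generalizing acc with
  | nil => simp [pvLoopA]
  | cons c rest ih =>
    have hne : c ≠ '.' := by rintro rfl; exact hp (List.mem_cons_self ..)
    rw [pvLoopA, if_neg (by intro hcon; omega), if_neg hne,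
      ih _ (fun hm => hp (List.mem_cons_of_mem _ hm))]
    simp

-- A's loop with countOfDot ≤ 1 crosses the next dot.
theorem pvLoopA_dot (pre rest acc : List Char) (cnt : Int) (hc : cnt ≤ 1) (hp : '.' ∉ pre) :
    pvLoopA (pre ++ '.' :: rest) acc cnt = pvLoopA rest (acc ++ pre ++ ['.']) (cnt + 1) := by
  induction pre generalizing acc with
  | nil => rw [List.nil_append, pvLoopA, if_neg (by intro hcon; omega), if_pos rfl]; simp
  | cons c p ih =>
    have hne : c ≠ '.' := by rintro rfl; exact hp (List.mem_cons_self ..)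
    rw [List.cons_append, pvLoopA, if_neg (by intro hcon; omega), if_neg hne,
      ih _ (fun hm => hp (List.mem_cons_of_mem _ hm))]
    simp

-- B's dot-position list over a dot-free string is empty.
theorem pv_dots_noDot (cs : List Char) (n : Int) (h : '.' ∉ cs) :
    ((PySem.List.enumerate cs n).filter (fun p => p.2 == '.')).map (·.1) = [] := by
  induction cs generalizing n with
  | nil => simp [PySem.List.enumerate]
  | cons c rest ih =>
    have hne : c ≠ '.' := by rintro rfl; exact h (List.mem_cons_self ..)
    rw [PySem.List.enumerate]
    simp only [List.filter_cons]
    rw [if_neg (by simp [hne])]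
    exact ih _ (fun hm => h (List.mem_cons_of_mem _ hm))

-- B's dot-position list over pre ++ '.' :: rest, '.' ∉ pre.
theorem pv_dots_split (pre rest : List Char) (n : Int) (hp : '.' ∉ pre) :
    ((PySem.List.enumerate (pre ++ '.' :: rest) n).filter (fun p => p.2 == '.')).map (·.1)
      = (n + pre.length) :: ((PySem.List.enumerate rest (n + pre.length + 1)).filter (fun p => p.2 == '.')).map (·.1) := by
  induction pre generalizing n with
  | nil =>
    rw [List.nil_append, PySem.List.enumerate]
    simp only [List.filter_cons]
    rw [if_pos (by simp)]
    simp
  | cons c p ih =>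
    have hne : c ≠ '.' := by rintro rfl; exact hp (List.mem_cons_self ..)
    rw [List.cons_append, PySem.List.enumerate]
    simp only [List.filter_cons]
    have e1 : n + (((c :: p).length : Nat) : Int) = (n + 1) + p.length := by
      push_cast [List.length_cons]; ring
    rw [e1, if_neg (by simp [hne]), ih _ (fun hm => hp (List.mem_cons_of_mem _ hm))]

-- B's while loop = start index + length of the digit run from there.
theorem pvScan_eq (cs : List Char) (k : Nat) :
    pvScan cs (k : Int) = (k : Int) + ((cs.drop k).takeWhile PySem.Chars.isdigit).length := by
  rw [pvScan]
  by_cases hk : k < cs.length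
  · have hcond : 0 ≤ (k : Int) ∧ (k : Int) < (cs.length : Int) := ⟨Int.natCast_nonneg k, by exact_mod_cast hk⟩
    rw [dif_pos hcond]
    have htn : ((k : Int)).toNat = k := Int.toNat_natCast k
    have hdrop : cs.drop k = cs[k] :: cs.drop (k + 1) := List.drop_eq_getElem_cons hk
    by_cases hd : PySem.Chars.isdigit cs[k]
    · have : PySem.Chars.isdigit (cs[((k : Int)).toNat]'(by omega)) = true := by
        simp only [htn]; exact hd
      rw [if_pos this]
      have hstep : (k : Int) + 1 = ((k + 1 : Nat) : Int) := by push_cast; ring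
      rw [hstep, pvScan_eq cs (k + 1), hdrop, List.takeWhile_cons_of_pos hd]
      push_cast [List.length_cons]
      ring
    · have : ¬ PySem.Chars.isdigit (cs[((k : Int)).toNat]'(by omega)) = true := by
        simp only [htn]; exact hd
      rw [if_neg this, hdrop, List.takeWhile_cons_of_neg (by simp [hd])]
      simp
  · rw [dif_neg (by intro hcon; omega)]
    rw [List.drop_eq_nil_of_le (by omega)]
    simp
termination_by (cs.length - k : Nat)
decreasing_by omega

theorem pv_take_takeWhile {α : Type} (p : α → Bool) (l : List α) :
    l.take (l.takeWhile p).length = l.takeWhile p := by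
  induction l with
  | nil => simp
  | cons a t ih =>
    by_cases hp : p a <;> simp [hp, ih]

-- every string containing a dot splits at its first dot
theorem pv_split_first (cs : List Char) (h : '.' ∈ cs) :
    ∃ p r, cs = p ++ '.' :: r ∧ '.' ∉ p := by
  induction cs with
  | nil => cases h
  | cons c rest ih =>
    by_cases hc : c = '.'
    · exact ⟨[], rest, by rw [hc]; rfl, by simp⟩
    · obtain ⟨p, r, he, hp⟩ := ih (by cases h with
        | head => exact absurd rfl hc
        | tail _ hm => exact hm)
      refine ⟨c :: p, r, by rw [he]; rfl, ?_⟩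
      intro hm
      rcases List.mem_cons.mp hm with h | h
      · exact hc h.symm
      · exact hp h

-- reduce B's match once the shape of the dot list is known
theorem pv_alt_cons (ver : String) (a j : Int) (t : List Int)
    (h : ((PySem.List.enumerate ver.toList).filter (fun p => p.2 == '.')).map (·.1) = a :: j :: t) :
    format_ver_alt ver
      = String.ofList (PySem.List.slice ver.toList none (some (pvScan ver.toList (j + 1)))) := by
  unfold format_ver_alt
  rw [h]

theorem pv_alt_nil (ver : String)
    (h : ((PySem.List.enumerate ver.toList).filter (fun p => p.2 == '.')).map (·.1) = []) :
    format_ver_alt ver = ver := by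
  unfold format_ver_alt
  rw [h]

theorem pv_alt_single (ver : String) (a : Int)
    (h : ((PySem.List.enumerate ver.toList).filter (fun p => p.2 == '.')).map (·.1) = [a]) :
    format_ver_alt ver = ver := by
  unfold format_ver_alt
  rw [h]

-- ===== VERDICT (by name: the statement is the Claim_ definition above) =====
theorem format_ver_spec : Claim_equal_format_ver := by
  intro ver _
  unfold Spec_format_ver format_ver
  by_cases h0 : '.' ∈ ver.toList
  · obtain ⟨p0, r0, e0, hp0⟩ := pv_split_first _ h0
    by_cases h1 : '.' ∈ r0
    · obtain ⟨p1, rest, e1, hp1⟩ := pv_split_first _ h1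
      subst e1
      -- A's side
      rw [e0, pvLoopA_dot _ _ _ 0 (by omega) hp0,
        show (0 : Int) + 1 = 1 from by norm_num,
        pvLoopA_dot _ _ _ 1 (by omega) hp1,
        show (1 : Int) + 1 = 2 from by norm_num,
        pvLoopA_ge2 _ _ 2 (by omega)]
      -- B's side
      have hd : ((PySem.List.enumerate ver.toList).filter (fun p => p.2 == '.')).map (·.1)
          = ((0 : Int) + p0.length) :: (((0 : Int) + p0.length + 1) + p1.length) ::
            ((PySem.List.enumerate rest (((0 : Int) + p0.length + 1) + p1.length + 1)).filter
              (fun p => p.2 == '.')).map (·.1) := by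
        rw [e0, pv_dots_split _ _ _ hp0, pv_dots_split _ _ _ hp1]
      rw [pv_alt_cons ver _ _ _ hd]
      have hj1 : ((0 : Int) + p0.length + 1 + p1.length) + 1
          = ((p0.length + 1 + p1.length + 1 : Nat) : Int) := by push_cast; ring
      have hpref : ver.toList = (p0 ++ '.' :: p1 ++ ['.']) ++ rest := by
        rw [e0]; simp
      have hlen : (p0 ++ '.' :: p1 ++ ['.']).length = p0.length + 1 + p1.length + 1 := by
        simp; omega
      rw [hj1, pvScan_eq]
      have hdrop : ver.toList.drop (p0.length + 1 + p1.length + 1) = rest := by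
        rw [hpref, ← hlen, List.drop_left]
      rw [hdrop]
      have hk : (((p0.length + 1 + p1.length + 1 : Nat)) : Int)
            + ((rest.takeWhile PySem.Chars.isdigit).length : Nat)
          = (((p0.length + 1 + p1.length + 1 + (rest.takeWhile PySem.Chars.isdigit).length : Nat)) : Int) := by
        push_cast; ring
      rw [hk, PySem.List.slice_to_natCast]
      rw [hpref, ← hlen, List.take_append, List.take_of_length_le (by omega),
        Nat.add_sub_cancel_left, pv_take_takeWhile]
      simp
    · -- exactly one dot: both sides return the whole string
      rw [e0, pvLoopA_dot _ _ _ 0 (by omega) hp0, pvLoopA_noDot _ _ _ (by omega) h1]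
      have hd : ((PySem.List.enumerate ver.toList).filter (fun p => p.2 == '.')).map (·.1)
          = [(0 : Int) + p0.length] := by
        rw [e0, pv_dots_split _ _ _ hp0, pv_dots_noDot _ _ h1]
      rw [pv_alt_single ver _ hd,
        show ([] : List Char) ++ p0 ++ ['.'] ++ r0 = ver.toList from by rw [e0]; simp]
      simp
  · rw [pvLoopA_noDot _ _ _ (by omega) h0,
      pv_alt_nil ver (pv_dots_noDot _ _ h0)]
    simp
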